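-- pv_equiv track=rewrite | github.com/rddrdhd/advent_of_code | y2025/day04.py | get_coords_to_remove
-- ===== SOURCE A (Python) =====
-- directions = [(-1, -1), (-1, 0), (-1, 1),
--             (0, -1),           (0, 1),
--             (1, -1),  (1, 0),  (1, 1)]
--
-- def get_coords_to_remove(coords):
--     original_coords = set(coords.keys())
--     for (x, y) in coords:
--         count = 0
--         for dx, dy in directions:
--             if dx == 0 and dy == 0:
--                 continue
--             nx, ny = x + dx, y + dy
--             if (nx, ny) in original_coords:
--                 count += 1
--         coords[(x, y)] = count
--     return [key for key, val in coords.items() if val < 4]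
-- ===== SOURCE B (Python) =====
-- def get_coords_to_remove(coords):
--     # Row-bucket index: group occupied cells by x, then for each cell count the
--     # occupied cells in its 3x3 box by scanning the three relevant row buckets
--     # and subtract 1 for the cell itself. No per-neighbour membership tests.
--     rows = {}
--     for (x, y) in coords:
--         rows.setdefault(x, []).append(y)
--     for (x, y) in coords:
--         c = 0
--         for r in (x - 1, x, x + 1):
--             for y2 in rows.get(r, ()):
--                 if y - 1 <= y2 <= y + 1:
--                     c += 1
--         coords[(x, y)] = c - 1
--     return [key for key, val in coords.items() if val < 4]
-- ===== Notes on version B (the rewrite author's own statement) =====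
-- stated objective: alternative
-- what changed: B replaces A's per-cell hash lookups of the 8 neighbour offsets by a row-bucket index: cells are grouped by x, each cell's neighbour count is obtained by scanning the three adjacent row buckets for y-values within 1 and subtracting the cell itself; no neighbour membership test is performed.
import Mathlib
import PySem

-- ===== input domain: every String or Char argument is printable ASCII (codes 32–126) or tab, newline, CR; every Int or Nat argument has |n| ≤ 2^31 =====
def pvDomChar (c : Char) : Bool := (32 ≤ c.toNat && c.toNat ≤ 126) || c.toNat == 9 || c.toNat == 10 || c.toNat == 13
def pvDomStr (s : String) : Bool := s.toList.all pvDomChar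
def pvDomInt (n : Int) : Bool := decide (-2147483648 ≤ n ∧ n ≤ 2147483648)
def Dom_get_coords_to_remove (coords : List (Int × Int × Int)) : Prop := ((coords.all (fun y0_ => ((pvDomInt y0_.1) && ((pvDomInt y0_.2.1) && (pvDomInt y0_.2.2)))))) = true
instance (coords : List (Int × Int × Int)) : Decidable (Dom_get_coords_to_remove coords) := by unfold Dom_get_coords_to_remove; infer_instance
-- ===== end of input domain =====

-- B replaces A's 8 per-neighbour hash lookups by a row-bucket index (cells grouped by x,
-- counting y-values within 1 in the three adjacent rows, minus the cell itself); same return value.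
-- Both Pythons mutate the dict's values identically; the equivalence proved is about the return value.

def pvDirections : List (Int × Int) :=
  [(-1, -1), (-1, 0), (-1, 1), (0, -1), (0, 1), (1, -1), (1, 0), (1, 1)]

-- ===== PORT A =====
def get_coords_to_remove (coords : List (Int × Int × Int)) : List (Int × Int) :=
  let d0 : PySem.Dict (Int × Int) Int :=
    PySem.Dict.ofList (coords.map (fun t => ((t.1, t.2.1), t.2.2)))
  let original : PySem.Set (Int × Int) := PySem.Set.ofList d0.keys
  let d := d0.keys.foldl (fun d k =>
    let count : Int := pvDirections.foldl (fun count dxy =>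
      if dxy.1 = 0 ∧ dxy.2 = 0 then count
      else if (k.1 + dxy.1, k.2 + dxy.2) ∈ original then count + 1 else count) 0
    d.insert k count) d0
  (d.items.filter (fun kv => kv.2 < 4)).map (fun kv => kv.1)

-- ===== PORT B =====
def get_coords_to_remove_alt (coords : List (Int × Int × Int)) : List (Int × Int) :=
  let d0 : PySem.Dict (Int × Int) Int :=
    PySem.Dict.ofList (coords.map (fun t => ((t.1, t.2.1), t.2.2)))
  -- rows.setdefault(x, []).append(y)
  let rows : PySem.Dict Int (List Int) :=
    d0.keys.foldl (fun rows k => rows.insert k.1 ((rows.getD k.1 []) ++ [k.2])) PySem.Dict.empty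
  let d := d0.keys.foldl (fun d k =>
    let c : Int := [k.1 - 1, k.1, k.1 + 1].foldl (fun c r =>
      (rows.getD r []).foldl (fun c y2 =>
        if k.2 - 1 ≤ y2 ∧ y2 ≤ k.2 + 1 then c + 1 else c) c) 0
    d.insert k (c - 1)) d0
  (d.items.filter (fun kv => kv.2 < 4)).map (fun kv => kv.1)

-- ===== PRECONDITION & SPEC =====
def Spec_get_coords_to_remove (coords : List (Int × Int × Int)) (out : List (Int × Int)) : Prop := out = get_coords_to_remove_alt coords
instance (coords : List (Int × Int × Int)) (out : List (Int × Int)) : Decidable (Spec_get_coords_to_remove coords out) := by unfold Spec_get_coords_to_remove; infer_instance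

-- ===== CLAIM (what is proved, stated in full; the proofs are below) =====
def Claim_equal_get_coords_to_remove : Prop := ∀ (coords : List (Int × Int × Int)), Dom_get_coords_to_remove coords → Spec_get_coords_to_remove coords (get_coords_to_remove coords)

-- ===== LEMMAS AND PROOFS =====

-- 3x3-box indicator around k
def pvBox (k k' : Int × Int) : Int :=
  if k.1 - 1 ≤ k'.1 ∧ k'.1 ≤ k.1 + 1 ∧ k.2 - 1 ≤ k'.2 ∧ k'.2 ≤ k.2 + 1 then 1 else 0

-- overwriting fold on contained keys rewrites items pointwise
theorem pv_foldl_insert_items (f : (Int × Int) → Int) :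
    ∀ (L : List (Int × Int)) (d : PySem.Dict (Int × Int) Int),
      (∀ k ∈ L, d.contains k = true) →
      (L.foldl (fun d k => d.insert k (f k)) d).items
        = d.items.map (fun p => if p.1 ∈ L then (p.1, f p.1) else p) := by
  intro L
  induction L with
  | nil => intro d _; simp
  | cons k L ih =>
    intro d h
    have hk : d.contains k = true := h k (List.mem_cons_self ..)
    have hstep : ∀ k' ∈ L, (d.insert k (f k)).contains k' = true := by
      intro k' hk'
      rw [PySem.Dict.contains_insert]
      simp [h k' (List.mem_cons_of_mem _ hk')]
    rw [List.foldl_cons, ih _ hstep, PySem.Dict.items_insert_of_contains _ _ hk]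
    rw [List.map_map]
    apply List.map_congr_left
    intro p _
    by_cases hpk : p.1 = k
    · simp [hpk]
    · simp only [Function.comp]
      have : (p.1 == k) = false := by simp [hpk]
      simp only [this, Bool.false_eq_true, if_false]
      by_cases hin : p.1 ∈ L <;> simp [hin, hpk]

theorem pv_sum_indicator (v : Int × Int) :
    ∀ (K : List (Int × Int)), K.Nodup →
      (K.map (fun c => if c = v then (1 : Int) else 0)).sum = if v ∈ K then 1 else 0 := by
  intro K
  induction K with
  | nil => simp
  | cons c K ih =>
    intro h
    rw [List.map_cons, List.sum_cons, ih (List.Nodup.of_cons h)]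
    by_cases hcv : c = v
    · subst hcv
      have hnm : c ∉ K := (List.nodup_cons.mp h).1
      simp [hnm]
    · have hvc : v ≠ c := fun h' => hcv h'.symm
      simp [List.mem_cons, hvc, hcv]

theorem pv_sum_swap {α β : Type} (K : List α) (ds : List β) (f : α → β → Int) :
    (K.map (fun c => (ds.map (fun d => f c d)).sum)).sum
      = (ds.map (fun d => (K.map (fun c => f c d)).sum)).sum := by
  induction K with
  | nil => simp
  | cons c K ih =>
    rw [List.map_cons, List.sum_cons, ih, ← PySem.List.sum_map_add_int]
    rfl

theorem pv_sum_map_sub (K : List (Int × Int)) (f g : (Int × Int) → Int) :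
    (K.map (fun c => f c - g c)).sum = (K.map f).sum - (K.map g).sum := by
  induction K with
  | nil => simp
  | cons c K ih => simp only [List.map_cons, List.sum_cons, ih]; ring

-- per-cell: the 8 direction indicators sum to box-minus-self
theorem pv_dirs_indicator (k k' : Int × Int) :
    (pvDirections.map (fun d => if k' = (k.1 + d.1, k.2 + d.2) then (1 : Int) else 0)).sum
      = pvBox k k' - (if k' = k then 1 else 0) := by
  simp only [pvDirections, pvBox, List.map_cons, List.map_nil, List.sum_cons, List.sum_nil,
    Prod.ext_iff]
  split_ifs <;> omega

theorem pv_gather_eq_sum (S : PySem.Set (Int × Int)) (k : Int × Int) :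
    ∀ (ds : List (Int × Int)) (a : Int),
      ds.foldl (fun count dxy =>
          if dxy.1 = 0 ∧ dxy.2 = 0 then count
          else if (k.1 + dxy.1, k.2 + dxy.2) ∈ S then count + 1 else count) a
        = a + (ds.map (fun dxy =>
            if dxy.1 = 0 ∧ dxy.2 = 0 then 0
            else if (k.1 + dxy.1, k.2 + dxy.2) ∈ S then (1 : Int) else 0)).sum := by
  intro ds
  induction ds with
  | nil => intro a; simp
  | cons d ds ih =>
    intro a
    rw [List.foldl_cons, List.map_cons, List.sum_cons, ih]
    split_ifs <;> ring

-- A's inner gather loop counts the occupied 3x3 box minus the cell itself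
theorem pv_gather_eq_box (K : List (Int × Int)) (hK : K.Nodup) (k : Int × Int) (hk : k ∈ K) :
    pvDirections.foldl (fun count dxy =>
        if dxy.1 = 0 ∧ dxy.2 = 0 then count
        else if (k.1 + dxy.1, k.2 + dxy.2) ∈ PySem.Set.ofList K then count + 1 else count) 0
      = (K.map (fun k' => pvBox k k')).sum - 1 := by
  rw [pv_gather_eq_sum]
  have hzero : ∀ dxy ∈ pvDirections, ¬(dxy.1 = 0 ∧ dxy.2 = 0) := by decide
  rw [List.map_congr_left (fun dxy h => by
    rw [if_neg (hzero dxy h)] :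
    ∀ dxy ∈ pvDirections, (if dxy.1 = 0 ∧ dxy.2 = 0 then 0
        else if (k.1 + dxy.1, k.2 + dxy.2) ∈ PySem.Set.ofList K then (1 : Int) else 0)
      = (if (k.1 + dxy.1, k.2 + dxy.2) ∈ PySem.Set.ofList K then (1 : Int) else 0))]
  have hmem : ∀ dxy : Int × Int,
      (if (k.1 + dxy.1, k.2 + dxy.2) ∈ PySem.Set.ofList K then (1 : Int) else 0)
        = (K.map (fun k' => if k' = (k.1 + dxy.1, k.2 + dxy.2) then (1 : Int) else 0)).sum := by
    intro dxy
    rw [pv_sum_indicator _ K hK]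
    simp [PySem.Set.mem_ofList]
  rw [List.map_congr_left (fun dxy _ => hmem dxy), ← pv_sum_swap K pvDirections
    (fun k' d => if k' = (k.1 + d.1, k.2 + d.2) then (1 : Int) else 0)]
  rw [List.map_congr_left (fun k' _ => pv_dirs_indicator k k'), pv_sum_map_sub,
    pv_sum_indicator k K hK, if_pos hk, zero_add]

-- the rows dict built by B holds, at r, the y's of the cells with x = r, in order
theorem pv_rows_getD :
    ∀ (K : List (Int × Int)) (acc : PySem.Dict Int (List Int)) (r : Int),
      ((K.foldl (fun rows k => rows.insert k.1 ((rows.getD k.1 []) ++ [k.2])) acc).getD r [])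
        = acc.getD r [] ++ (K.filter (fun k => k.1 = r)).map Prod.snd := by
  intro K
  induction K with
  | nil => intro acc r; simp
  | cons k K ih =>
    intro acc r
    rw [List.foldl_cons, ih, PySem.Dict.getD_insert, List.filter_cons]
    by_cases hkr : k.1 = r
    · subst hkr
      simp
    · have h1 : ¬ (r = k.1) := fun h => hkr h.symm
      simp [h1, hkr]

-- B's window-count loop as a sum
theorem pv_count_fold (y : Int) :
    ∀ (ys : List Int) (c : Int),
      ys.foldl (fun c y2 => if y - 1 ≤ y2 ∧ y2 ≤ y + 1 then c + 1 else c) c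
        = c + (ys.map (fun y2 => if y - 1 ≤ y2 ∧ y2 ≤ y + 1 then (1 : Int) else 0)).sum := by
  intro ys
  induction ys with
  | nil => intro c; simp
  | cons y2 ys ih =>
    intro c
    rw [List.foldl_cons, List.map_cons, List.sum_cons, ih]
    split_ifs <;> ring

theorem pv_filter_sum (r : Int) (f : Int → Int) :
    ∀ (K : List (Int × Int)),
      (((K.filter (fun k => k.1 = r)).map Prod.snd).map f).sum
        = (K.map (fun k' => if k'.1 = r then f k'.2 else 0)).sum := by
  intro K
  induction K with
  | nil => simp
  | cons k K ih =>
    rw [List.filter_cons, List.map_cons, List.sum_cons]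
    by_cases hkr : k.1 = r
    · simp only [hkr, decide_true, if_true, List.map_cons, List.sum_cons, ih]
    · simp only [hkr, decide_false, if_false, ih, Bool.false_eq_true]
      omega

-- B's per-cell count over the three row buckets equals the box sum
theorem pv_rows_count_eq_box (K : List (Int × Int)) (k : Int × Int) :
    [k.1 - 1, k.1, k.1 + 1].foldl (fun c r =>
      ((K.foldl (fun rows kk => rows.insert kk.1 ((rows.getD kk.1 []) ++ [kk.2]))
          PySem.Dict.empty).getD r []).foldl
        (fun c y2 => if k.2 - 1 ≤ y2 ∧ y2 ≤ k.2 + 1 then c + 1 else c) c) 0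
      = (K.map (fun k' => pvBox k k')).sum := by
  have hrow : ∀ r : Int,
      (((K.foldl (fun rows kk => rows.insert kk.1 ((rows.getD kk.1 []) ++ [kk.2]))
          PySem.Dict.empty).getD r []).map
        (fun y2 => if k.2 - 1 ≤ y2 ∧ y2 ≤ k.2 + 1 then (1 : Int) else 0)).sum
        = (K.map (fun k' => if k'.1 = r then
            (if k.2 - 1 ≤ k'.2 ∧ k'.2 ≤ k.2 + 1 then (1 : Int) else 0) else 0)).sum := by
    intro r
    rw [pv_rows_getD K PySem.Dict.empty r, PySem.Dict.getD_empty, List.nil_append]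
    exact pv_filter_sum r _ K
  simp only [List.foldl_cons, List.foldl_nil]
  rw [pv_count_fold, pv_count_fold, pv_count_fold, hrow, hrow, hrow, zero_add, add_assoc,
    ← PySem.List.sum_map_add_int, ← PySem.List.sum_map_add_int]
  apply congrArg
  apply List.map_congr_left
  intro k' _
  simp only [pvBox]
  split_ifs <;> omega

-- ===== VERDICT (by name: the statement is the Claim_ definition above) =====
theorem get_coords_to_remove_spec : Claim_equal_get_coords_to_remove := by
  intro coords _
  unfold Spec_get_coords_to_remove get_coords_to_remove get_coords_to_remove_alt
  dsimp only
  generalize hd0 : PySem.Dict.ofList (coords.map (fun t => ((t.1, t.2.1), t.2.2))) = d0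
  have hnd : d0.keys.Nodup := hd0 ▸ PySem.Dict.nodup_keys_ofList _
  have hcont : ∀ k ∈ d0.keys, d0.contains k = true := fun k hk =>
    (PySem.Dict.contains_iff_mem_keys _ _).mpr hk
  rw [pv_foldl_insert_items (fun k => pvDirections.foldl (fun count dxy =>
        if dxy.1 = 0 ∧ dxy.2 = 0 then count
        else if (k.1 + dxy.1, k.2 + dxy.2) ∈ PySem.Set.ofList d0.keys then count + 1 else count) 0)
      d0.keys d0 hcont,
    pv_foldl_insert_items (fun k =>
      ([k.1 - 1, k.1, k.1 + 1].foldl (fun c r =>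
        ((d0.keys.foldl (fun rows kk => rows.insert kk.1 ((rows.getD kk.1 []) ++ [kk.2]))
            PySem.Dict.empty).getD r []).foldl
          (fun c y2 => if k.2 - 1 ≤ y2 ∧ y2 ≤ k.2 + 1 then c + 1 else c) c) 0 - 1))
      d0.keys d0 hcont]
  apply congrArg
  apply congrArg
  apply List.map_congr_left
  intro p hp
  have hk : p.1 ∈ d0.keys := PySem.Dict.mem_keys_of_mem_items _ hp
  rw [if_pos hk, if_pos hk, pv_gather_eq_box d0.keys hnd p.1 hk,
    pv_rows_count_eq_box d0.keys p.1]
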